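-- pv_equiv track=rewrite | github.com/xonq/mycotools | mycotools/crap.py | gene2hg2ome2hg
-- ===== SOURCE A (Python) =====
-- def gene2hg2ome2hg(gene2hg):
--     """Acquire a hash {ome: {gene: hg}}"""
--     ome_gene2hg = {}
--     for gene, hg in gene2hg.items():
--         ome = gene[:gene.find('_')]
--         if ome not in ome_gene2hg:
--             ome_gene2hg[ome] = {}
--         ome_gene2hg[ome][gene] = hg
--     return ome_gene2hg
-- ===== SOURCE B (Python) =====
-- def gene2hg2ome2hg(gene2hg):
--     """Acquire a hash {ome: {gene: hg}}"""
--     items = list(gene2hg.items())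
--     omes = []
--     for gene, _hg in items:
--         ome = gene[:gene.find('_')]
--         if ome not in omes:
--             omes.append(ome)
--     return {ome: {g: h for g, h in items if g[:g.find('_')] == ome}
--             for ome in omes}
-- ===== Notes on version B (the rewrite author's own statement) =====
-- stated objective: alternative
-- what changed: B replaces A's single-pass incremental nested-dict insertion with a two-phase nested-scan: it first collects the ordered distinct ome prefixes, then for each ome filters the whole mapping in a dict comprehension to build that ome's inner dict.
import Mathlib
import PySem

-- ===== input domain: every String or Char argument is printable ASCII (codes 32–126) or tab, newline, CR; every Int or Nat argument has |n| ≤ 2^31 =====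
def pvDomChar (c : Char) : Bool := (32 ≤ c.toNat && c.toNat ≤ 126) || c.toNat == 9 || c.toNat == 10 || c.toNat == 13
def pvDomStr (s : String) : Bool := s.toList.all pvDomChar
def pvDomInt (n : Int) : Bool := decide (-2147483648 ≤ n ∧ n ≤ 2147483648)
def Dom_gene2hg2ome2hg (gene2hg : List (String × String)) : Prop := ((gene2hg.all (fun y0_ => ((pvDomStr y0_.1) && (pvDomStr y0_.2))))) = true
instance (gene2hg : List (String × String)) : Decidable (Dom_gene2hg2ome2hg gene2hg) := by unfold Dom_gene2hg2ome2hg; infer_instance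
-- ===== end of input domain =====

-- B: two-phase nested scan (ordered distinct omes first, then a filtering comprehension per ome) instead of A's single-pass incremental nested-dict insertion; alternative decomposition, same result.
-- ===== PORT A =====
-- ome = gene[:gene.find('_')]  (find may be -1: Python slice then drops the last char)
def pvOme (gene : String) : String :=
  PySem.Str.slice gene none (some (PySem.Str.find gene "_"))

-- the loop body: ensure the ome key exists, then set inner[gene] = hg
def pvStepA (acc : PySem.Dict String (PySem.Dict String String)) (p : String × String) :
    PySem.Dict String (PySem.Dict String String) :=
  (if acc.contains (pvOme p.1) then acc else acc.insert (pvOme p.1) PySem.Dict.empty).modify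
    (pvOme p.1) PySem.Dict.empty (fun inner => inner.insert p.1 p.2)

def gene2hg2ome2hg (gene2hg : List (String × String)) : List (String × List (String × String)) :=
  ((gene2hg.foldl pvStepA PySem.Dict.empty).items).map (fun q => (q.1, q.2.items))

-- ===== PORT B =====
-- first pass: ordered list of distinct omes ('if ome not in omes: omes.append(ome)')
def pvOmesB (gene2hg : List (String × String)) : List String :=
  gene2hg.foldl
    (fun omes p => if omes.contains (pvOme p.1) then omes else omes ++ [pvOme p.1]) []

-- second phase: for each ome, dict comprehension over the pairs whose prefix matches
def gene2hg2ome2hg_alt (gene2hg : List (String × String)) : List (String × List (String × String)) :=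
  (pvOmesB gene2hg).map
    (fun o => (o, (PySem.Dict.ofList (gene2hg.filter (fun p => pvOme p.1 == o))).items))

-- ===== PRECONDITION & SPEC =====
def Spec_gene2hg2ome2hg (gene2hg : List (String × String)) (out : List (String × List (String × String))) : Prop := out = gene2hg2ome2hg_alt gene2hg
instance (gene2hg : List (String × String)) (out : List (String × List (String × String))) : Decidable (Spec_gene2hg2ome2hg gene2hg out) := by unfold Spec_gene2hg2ome2hg; infer_instance

-- ===== CLAIM (what is proved, stated in full; the proofs are below) =====
def Claim_equal_gene2hg2ome2hg : Prop := ∀ (gene2hg : List (String × String)), Dom_gene2hg2ome2hg gene2hg → Spec_gene2hg2ome2hg gene2hg (gene2hg2ome2hg gene2hg)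

-- ===== LEMMAS AND PROOFS =====
theorem keys_stepA (d : PySem.Dict String (PySem.Dict String String)) (p : String × String) :
    (pvStepA d p).keys = PySem.Set.add d.keys (pvOme p.1) := by
  unfold pvStepA
  by_cases h : d.contains (pvOme p.1) = true
  · have hm : pvOme p.1 ∈ d.keys := (PySem.Dict.contains_iff_mem_keys d _).1 h
    rw [if_pos h, PySem.Dict.keys_modify, PySem.Dict.keys_insert_of_contains _ _ h]
    simp [PySem.Set.add, hm]
  · have h' : d.contains (pvOme p.1) = false := by simpa using h
    have hm : pvOme p.1 ∉ d.keys := fun hk =>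
      h ((PySem.Dict.contains_iff_mem_keys d _).2 hk)
    have hc : (d.insert (pvOme p.1) PySem.Dict.empty).contains (pvOme p.1) = true :=
      PySem.Dict.contains_insert_self ..
    rw [if_neg h, PySem.Dict.keys_modify, PySem.Dict.keys_insert_of_contains _ _ hc,
        PySem.Dict.keys_insert_of_not_contains _ _ h']
    simp [PySem.Set.add, hm]

theorem getD_stepA (d : PySem.Dict String (PySem.Dict String String)) (p : String × String)
    (o : String) :
    (pvStepA d p).getD o PySem.Dict.empty
      = if pvOme p.1 = o then (d.getD o PySem.Dict.empty).insert p.1 p.2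
        else d.getD o PySem.Dict.empty := by
  unfold pvStepA
  by_cases h : d.contains (pvOme p.1) = true
  · rw [if_pos h, PySem.Dict.getD_modify]
    by_cases ho : o = pvOme p.1
    · subst ho; simp
    · rw [if_neg ho, if_neg (fun hh => ho hh.symm)]
  · rw [if_neg h, PySem.Dict.getD_modify]
    by_cases ho : o = pvOme p.1
    · subst ho
      rw [if_pos rfl, PySem.Dict.getD_insert, if_pos rfl,
          PySem.Dict.getD_of_not_contains _ _ (by simpa using h), if_pos rfl]
    · rw [if_neg ho, if_neg (fun hh => ho hh.symm), PySem.Dict.getD_insert, if_neg ho]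

-- keys of A's fold = ordered dedup of the omes
theorem keysA (xs : List (String × String)) (d : PySem.Dict String (PySem.Dict String String)) :
    (xs.foldl pvStepA d).keys = PySem.Set.update d.keys (xs.map (fun p => pvOme p.1)) := by
  induction xs generalizing d with
  | nil => rfl
  | cons p xs ih => rw [List.foldl_cons, ih, keys_stepA]; rfl

theorem nodupA (xs : List (String × String)) (d : PySem.Dict String (PySem.Dict String String))
    (h : d.keys.Nodup) : (xs.foldl pvStepA d).keys.Nodup := by
  induction xs generalizing d with
  | nil => exact h
  | cons p xs ih =>
      rw [List.foldl_cons]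
      exact ih _ (by rw [keys_stepA]; exact PySem.Set.nodup_add _ _ h)

-- each entry of A's fold is the insert-fold of the filtered pairs
theorem getDA (xs : List (String × String)) (d : PySem.Dict String (PySem.Dict String String))
    (o : String) :
    (xs.foldl pvStepA d).getD o PySem.Dict.empty
      = (xs.filter (fun p => pvOme p.1 == o)).foldl
          (fun (d : PySem.Dict String String) p => d.insert p.1 p.2) (d.getD o PySem.Dict.empty) := by
  induction xs generalizing d with
  | nil => rfl
  | cons p xs ih =>
      rw [List.foldl_cons, ih, getD_stepA]
      by_cases ho : pvOme p.1 = o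
      · rw [if_pos ho, List.filter_cons_of_pos (by simpa using ho), List.foldl_cons]
      · rw [if_neg ho, List.filter_cons_of_neg (by simpa using ho)]

-- B's first pass computes exactly the ordered dedup of the omes
theorem omesB_eq_update (xs : List (String × String)) (s : List String) :
    xs.foldl (fun omes p => if omes.contains (pvOme p.1) then omes else omes ++ [pvOme p.1]) s
      = PySem.Set.update s (xs.map (fun p => pvOme p.1)) := by
  induction xs generalizing s with
  | nil => rfl
  | cons p xs ih =>
      rw [List.foldl_cons, ih]
      show PySem.Set.update _ _ = PySem.Set.update (PySem.Set.add s (pvOme p.1)) _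
      rw [PySem.Set.add]
      by_cases h : pvOme p.1 ∈ s
      · simp [PySem.Set.contains, h]
      · simp [PySem.Set.contains, h]

-- dict(pairs) is the insert-fold over the pairs
theorem ofList_eq_foldl_insert (l : List (String × String)) :
    PySem.Dict.ofList l
      = l.foldl (fun (d : PySem.Dict String String) p => d.insert p.1 p.2) PySem.Dict.empty := by
  rfl

-- ===== VERDICT (by name: the statement is the Claim_ definition above) =====
theorem gene2hg2ome2hg_spec : Claim_equal_gene2hg2ome2hg := by
  intro xs _
  unfold Spec_gene2hg2ome2hg gene2hg2ome2hg gene2hg2ome2hg_alt pvOmesB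
  rw [PySem.Dict.items_eq_map_keys _ (nodupA xs _ (by simp [PySem.Dict.keys_empty]))
        PySem.Dict.empty,
      keysA, omesB_eq_update, List.map_map]
  refine List.map_congr_left ?_
  intro o _
  simp only [Function.comp]
  rw [getDA, ofList_eq_foldl_insert]
  rfl
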